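-- pv_equiv track=rewrite | github.com/liskos/leletko | ege23/61.py | f
-- ===== SOURCE A (Python) =====
-- def f(a, b):
--     if a == 6:
--         return 0
--     if a > b:
--         return 0
--     if a == b:
--         return 1
--     return f(a+2,b) + f(a*3, b)
-- ===== SOURCE B (Python) =====
-- def f(a, b):
--     if a > b:
--         return 0
--     n = b - a + 1
--     counts = [0] * n
--     for i in range(n - 1, -1, -1):
--         v = a + i
--         if v == 6:
--             counts[i] = 0
--         elif v == b:
--             counts[i] = 1
--         else:
--             c2 = counts[i + 2] if i + 2 < n else 0
--             j = i + v * 2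
--             c3 = counts[j] if 0 <= j < n else 0
--             counts[i] = c2 + c3
--     return counts[0]
-- ===== Notes on version B (the rewrite author's own statement) =====
-- stated objective: faster
-- what changed: replaced A's branching recursion (one call tree node per path) with a single backward dynamic-programming pass that fills a flat table of path counts for each value from b down to a
import Mathlib
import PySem

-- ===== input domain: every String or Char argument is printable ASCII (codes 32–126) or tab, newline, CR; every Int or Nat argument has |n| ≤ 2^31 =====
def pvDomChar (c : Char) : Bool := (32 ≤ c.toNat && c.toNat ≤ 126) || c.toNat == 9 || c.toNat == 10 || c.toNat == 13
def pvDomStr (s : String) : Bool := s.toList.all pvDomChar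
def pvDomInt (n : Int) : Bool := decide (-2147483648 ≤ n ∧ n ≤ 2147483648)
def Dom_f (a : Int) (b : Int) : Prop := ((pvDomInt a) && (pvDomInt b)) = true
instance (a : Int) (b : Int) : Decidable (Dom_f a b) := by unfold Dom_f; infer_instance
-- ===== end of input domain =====

-- B replaces A's exponential branching recursion by one backward DP pass over a flat table of the values a..b (faster, asymptotic).

-- ===== PORT A =====
-- totality guard 'a ≤ 0': exactly where Python's recursion never terminates (outside Pre_f);
-- on 1 ≤ a both recursive calls strictly shrink b - a, so the recursion is well-founded
def f (a : Int) (b : Int) : Int :=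
  if a = 6 then 0
  else if a > b then 0
  else if a = b then 1
  else if a ≤ 0 then 0
  else f (a + 2) b + f (a * 3) b
termination_by (b - a).toNat
decreasing_by
  · omega
  · omega

-- ===== PORT B =====
-- loop body of Source B; counts[i] holds the count for the value v = a + i, n = b - a + 1
def fAltStep (a b n : Int) (counts : Array Int) (i : Int) : Array Int :=
  if a + i = 6 then counts.setIfInBounds i.toNat 0
  else if a + i = b then counts.setIfInBounds i.toNat 1
  else
    counts.setIfInBounds i.toNat
      ((if i + 2 < n then counts.getD (i + 2).toNat 0 else 0) +
       (if 0 ≤ i + (a + i) * 2 ∧ i + (a + i) * 2 < n then counts.getD (i + (a + i) * 2).toNat 0 else 0))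

def f_alt (a : Int) (b : Int) : Int :=
  -- counts[0]: index 0 is always in bounds here (b - a + 1 ≥ 1), so Python never raises
  if a > b then 0
  else
    ((PySem.List.pyRange (b - a + 1 - 1) (-1) (-1)).foldl (fAltStep a b (b - a + 1))
        (Array.replicate (b - a + 1).toNat 0)).getD 0 0

-- ===== PRECONDITION & SPEC =====
-- Pre_ excludes a ≤ 0 with a < b, where A's f(a*3,b) branch recurses forever (Python RecursionError).
def Pre_f (a : Int) (b : Int) : Prop := 1 ≤ a ∨ b ≤ a
instance (a : Int) (b : Int) : Decidable (Pre_f a b) := by unfold Pre_f; infer_instance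
def pvWitness_f : Int × Int := (1, 10)

def Spec_f (a : Int) (b : Int) (out : Int) : Prop := out = f_alt a b
instance (a : Int) (b : Int) (out : Int) : Decidable (Spec_f a b out) := by unfold Spec_f; infer_instance

-- ===== CLAIM (what is proved, stated in full; the proofs are below) =====
def Claim_equal_f : Prop := ∀ (a : Int) (b : Int), Dom_f a b → Pre_f a b → Spec_f a b (f a b)

-- ===== LEMMAS AND PROOFS =====

lemma f_six (b : Int) : f 6 b = 0 := by unfold f; simp

lemma f_gt {a b : Int} (h : b < a) : f a b = 0 := by
  unfold f
  split_ifs <;> first | rfl | omega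

lemma f_eq_self {a b : Int} (h6 : a ≠ 6) (h : a = b) : f a b = 1 := by
  unfold f
  split_ifs <;> first | rfl | omega

lemma f_rec {a b : Int} (ha : 1 ≤ a) (h6 : a ≠ 6) (hab : a < b) :
    f a b = f (a + 2) b + f (a * 3) b := by
  rw [f, if_neg h6, if_neg (by omega), if_neg (by omega), if_neg (by omega)]

-- branch forms of the loop body
lemma stepSix (a b n : Int) (counts : Array Int) (i : Int) (h : a + i = 6) :
    fAltStep a b n counts i = counts.setIfInBounds i.toNat 0 := by
  unfold fAltStep; rw [if_pos h]

lemma stepBase (a b n : Int) (counts : Array Int) (i : Int) (h6 : a + i ≠ 6) (h : a + i = b) :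
    fAltStep a b n counts i = counts.setIfInBounds i.toNat 1 := by
  unfold fAltStep; rw [if_neg h6, if_pos h]

lemma stepRec (a b n : Int) (counts : Array Int) (i : Int) (h6 : a + i ≠ 6) (hb : a + i ≠ b) :
    fAltStep a b n counts i = counts.setIfInBounds i.toNat
      ((if i + 2 < n then counts.getD (i + 2).toNat 0 else 0) +
       (if 0 ≤ i + (a + i) * 2 ∧ i + (a + i) * 2 < n then counts.getD (i + (a + i) * 2).toNat 0 else 0)) := by
  unfold fAltStep; rw [if_neg h6, if_neg hb]

-- the loop never changes the table size
lemma size_foldl_fAltStep (a b n : Int) :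
    ∀ (l : List Int) (counts : Array Int),
      (l.foldl (fAltStep a b n) counts).size = counts.size := by
  intro l
  induction l with
  | nil => intro c; rfl
  | cons x xs ihl =>
    intro c
    rw [List.foldl_cons, ihl]
    unfold fAltStep
    split_ifs <;> rw [Array.size_setIfInBounds]

-- after m backward steps the table holds f (a+j) b at every already-processed index j
lemma f_alt_inv (a b : Int) (ha : 1 ≤ a) (hab : a ≤ b) :
    ∀ m : Nat, m ≤ (b - a + 1).toNat → ∀ j : Nat,
      (((List.range m).map (fun k : Nat => b - a + 1 - 1 - (k : Int))).foldl
          (fAltStep a b (b - a + 1)) (Array.replicate (b - a + 1).toNat 0))[j]?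
        = if (j : Int) < b - a + 1 then
            some (if b - a + 1 - (m : Int) ≤ (j : Int) then f (a + (j : Int)) b else 0)
          else none := by
  intro m
  induction m with
  | zero =>
    intro _ j
    simp only [List.range_zero, List.map_nil, List.foldl_nil, Array.getElem?_replicate]
    split_ifs <;> first | rfl | omega
  | succ m ih =>
    intro hm j
    have ihm := ih (by omega)
    rw [List.range_succ, List.map_append, List.foldl_append]
    simp only [List.map_cons, List.map_nil, List.foldl_cons, List.foldl_nil]
    have hsize : (((List.range m).map (fun k : Nat => b - a + 1 - 1 - (k : Int))).foldl
        (fAltStep a b (b - a + 1)) (Array.replicate (b - a + 1).toNat 0)).size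
        = (b - a + 1).toNat := by
      rw [size_foldl_fAltStep, Array.size_replicate]
    set counts := ((List.range m).map (fun k : Nat => b - a + 1 - 1 - (k : Int))).foldl
        (fAltStep a b (b - a + 1)) (Array.replicate (b - a + 1).toNat 0) with hc
    set i : Int := b - a + 1 - 1 - (m : Int) with hi
    have hi0 : 0 ≤ i := by omega
    have hget : ∀ x : Int, 0 ≤ x → b - a + 1 - (m : Int) ≤ x →
        counts.getD x.toNat 0 = if x < b - a + 1 then f (a + x) b else 0 := by
      intro x hx0 hxm
      rw [Array.getD_eq_getD_getElem?, ihm x.toNat,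
          show ((x.toNat : Int)) = x from by omega]
      split_ifs with h1 h2 <;> first | rfl | omega
    by_cases h6 : a + i = 6
    · rw [stepSix _ _ _ _ _ h6, Array.getElem?_setIfInBounds, hsize]
      split_ifs with he hs h1 h2 <;>
        first
          | omega
          | rfl
          | (rw [show a + (j : Int) = 6 from by omega, f_six])
          | (rw [ihm j]; split_ifs <;> first | rfl | omega)
    · by_cases hb : a + i = b
      · rw [stepBase _ _ _ _ _ h6 hb, Array.getElem?_setIfInBounds, hsize]
        split_ifs with he hs h1 h2 <;>
          first
            | omega
            | rfl
            | (rw [show a + (j : Int) = b from by omega, f_eq_self (by omega) rfl])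
            | (rw [ihm j]; split_ifs <;> first | rfl | omega)
      · have hv1 : 1 ≤ a + i := by omega
        have hvlt : a + i < b := by omega
        have hc2 : (if i + 2 < b - a + 1 then counts.getD (i + 2).toNat 0 else 0)
            = f (a + i + 2) b := by
          split_ifs with h
          · rw [hget (i + 2) (by omega) (by omega), if_pos h,
                show a + (i + 2) = a + i + 2 from by ring]
          · rw [f_gt (by omega)]
        have hc3 : (if 0 ≤ i + (a + i) * 2 ∧ i + (a + i) * 2 < b - a + 1 then
              counts.getD (i + (a + i) * 2).toNat 0 else 0)
            = f ((a + i) * 3) b := by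
          split_ifs with h
          · rw [hget _ (by omega) (by omega), if_pos h.2,
                show a + (i + (a + i) * 2) = (a + i) * 3 from by ring]
          · rw [f_gt (by omega)]
        rw [stepRec _ _ _ _ _ h6 hb, hc2, hc3, ← f_rec hv1 h6 hvlt,
            Array.getElem?_setIfInBounds, hsize]
        split_ifs with he hs h1 h2 <;>
          first
            | omega
            | rfl
            | (rw [show a + (j : Int) = a + i from by omega])
            | (rw [ihm j]; split_ifs <;> first | rfl | omega)

-- ===== VERDICT (by name: the statement is the Claim_ definition above) =====
theorem f_spec : Claim_equal_f := by
  intro a b _ hpre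
  show f a b = f_alt a b
  rcases lt_trichotomy b a with hba | hba | hba
  · -- a > b: both 0
    rw [f_gt hba]
    simp only [f_alt, if_pos hba]
  · -- a = b: one loop iteration
    subst hba
    simp only [f_alt]
    rw [if_neg (lt_irrefl b),
        show b - b + 1 - 1 = (0 : Int) from by ring,
        show b - b + 1 = (1 : Int) from by ring,
        PySem.List.pyRange_neg_one_cons (by omega),
        PySem.List.pyRange_neg_one_eq_nil (by omega)]
    simp only [List.foldl_cons, List.foldl_nil]
    by_cases h6 : b = 6
    · rw [stepSix _ _ _ _ _ (show b + (0 : Int) = 6 by omega), h6, f_six]; rfl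
    · rw [stepBase _ _ _ _ _ (show b + (0 : Int) ≠ 6 by omega) (show b + (0 : Int) = b by ring),
          f_eq_self h6 rfl]
      rfl
  · -- a < b: Pre_ gives 1 ≤ a; use the DP invariant at the full range
    have ha : 1 ≤ a := by rcases hpre with h | h <;> omega
    simp only [f_alt, if_neg (by omega : ¬ a > b)]
    rw [PySem.List.pyRange_neg_one,
        show (b - a + 1 - 1 - (-1)).toNat = (b - a + 1).toNat from by omega,
        Array.getD_eq_getD_getElem?,
        f_alt_inv a b ha (by omega) ((b - a + 1).toNat) le_rfl 0,
        if_pos (show (((0 : Nat) : Int)) < b - a + 1 from by omega),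
        if_pos (show b - a + 1 - (((b - a + 1).toNat : Int)) ≤ ((0 : Nat) : Int) from by omega),
        show a + (((0 : Nat)) : Int) = a from by omega]
    rfl
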